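-- pv_equiv track=rewrite | github.com/silvivs/AED2---Dogo | Dogo_TP_AED2.py | inserirEstado
-- ===== SOURCE A (Python) =====
-- def inserirEstado(heap, estado):
--     ultimo = len(heap)
--     heap.append(estado)
--     pai = (ultimo - 1) // 2
--     while pai >= 0 and heap[ultimo] < heap[pai]:
--         heap[pai], heap[ultimo] = heap[ultimo], heap[pai]
--         ultimo = pai
--         pai = (ultimo - 1) // 2
--     return heap
-- ===== SOURCE B (Python) =====
-- def inserirEstado(heap, estado):
--     heap.append(estado)
--     # pass 1: materialize the ancestor path of the new slot (bottom-up)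
--     path = []
--     i = len(heap) - 1
--     while i > 0:
--         i = (i - 1) // 2
--         path.append(i)
--     # pass 2: count how many ancestors the new element passes (array untouched)
--     k = 0
--     while k < len(path) and estado < heap[path[k]]:
--         k += 1
--     # pass 3: rotate those ancestors one level down along the path, place the element
--     i = len(heap) - 1
--     for p in path[:k]:
--         heap[i] = heap[p]
--         i = p
--     heap[i] = estado
--     return heap
-- ===== Notes on version B (the rewrite author's own statement) =====
-- stated objective: alternative
-- what changed: A's single interleaved compare-and-swap sift-up loop is replaced by three staged passes: materialize the ancestor-index path of the new slot, count with a takeWhile-style scan over the untouched array how many ancestors the new element passes, then rotate exactly those ancestors one level down along the path and write the element once into its resting slot.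
import Mathlib
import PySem

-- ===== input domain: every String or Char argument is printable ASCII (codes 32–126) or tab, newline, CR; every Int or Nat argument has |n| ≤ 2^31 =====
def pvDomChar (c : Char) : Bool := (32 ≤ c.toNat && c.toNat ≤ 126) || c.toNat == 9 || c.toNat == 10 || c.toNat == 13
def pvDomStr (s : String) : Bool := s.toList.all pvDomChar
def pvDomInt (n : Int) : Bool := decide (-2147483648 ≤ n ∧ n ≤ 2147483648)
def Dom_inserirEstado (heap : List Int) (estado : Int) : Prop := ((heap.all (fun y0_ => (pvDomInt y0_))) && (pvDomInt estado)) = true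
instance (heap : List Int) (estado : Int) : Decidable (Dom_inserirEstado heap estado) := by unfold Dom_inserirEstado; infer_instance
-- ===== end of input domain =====

-- B replaces A's interleaved compare-and-swap sift-up by three staged passes (ancestor path,
-- violation count, rotation); both Pythons mutate the list in place — the equivalence proved
-- here is about the return value.

-- ===== PORT A =====
-- while pai >= 0 and heap[ultimo] < heap[pai]: swap; ultimo = pai; pai = (ultimo-1)//2
-- indices are always in range here, so pyGetD/pySetD are exact
def inserirLoopA (h : List Int) (ultimo : Int) : List Int :=
  let pai := PySem.Int.floordiv (ultimo - 1) 2
  if hc : 0 ≤ pai ∧ PySem.List.pyGetD h ultimo 0 < PySem.List.pyGetD h pai 0 then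
    inserirLoopA
      (PySem.List.pySetD (PySem.List.pySetD h pai (PySem.List.pyGetD h ultimo 0)) ultimo
        (PySem.List.pyGetD h pai 0))
      pai
  else h
termination_by ultimo.toNat
decreasing_by
  have hp : (0:Int) ≤ PySem.Int.floordiv (ultimo - 1) 2 := hc.1
  rw [PySem.Int.floordiv_eq_ediv_of_pos (by omega : (0:Int) < 2)] at hp ⊢
  omega

def inserirEstado (heap : List Int) (estado : Int) : List Int :=
  let ultimo : Int := (heap.length : Int)
  let heap := heap ++ [estado]
  inserirLoopA heap ultimo

-- ===== PORT B =====
-- pass 1: while i > 0: i = (i-1)//2; path.append(i)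
def pathB (i : Int) : List Int :=
  if h : 0 < i then
    let p := PySem.Int.floordiv (i - 1) 2
    p :: pathB p
  else []
termination_by i.toNat
decreasing_by
  rw [PySem.Int.floordiv_eq_ediv_of_pos (by omega : (0:Int) < 2)]
  omega

-- pass 2: while k < len(path) and estado < heap[path[k]]: k += 1
def countB (h : List Int) (estado : Int) : List Int → Nat
  | [] => 0
  | p :: ps => if estado < PySem.List.pyGetD h p 0 then 1 + countB h estado ps else 0

-- pass 3: for p in path[:k]: heap[i] = heap[p]; i = p; finally heap[i] = estado
def shiftB (estado : Int) (h : List Int) (i : Int) : List Int → List Int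
  | [] => PySem.List.pySetD h i estado
  | p :: ps => shiftB estado (PySem.List.pySetD h i (PySem.List.pyGetD h p 0)) p ps

def inserirEstado_alt (heap : List Int) (estado : Int) : List Int :=
  let h := heap ++ [estado]
  let path := pathB ((h.length : Int) - 1)
  let k := countB h estado path
  shiftB estado h ((h.length : Int) - 1) (path.take k)

-- ===== PRECONDITION & SPEC =====
def Spec_inserirEstado (heap : List Int) (estado : Int) (out : List Int) : Prop := out = inserirEstado_alt heap estado
instance (heap : List Int) (estado : Int) (out : List Int) : Decidable (Spec_inserirEstado heap estado out) := by unfold Spec_inserirEstado; infer_instance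

-- ===== CLAIM (what is proved, stated in full; the proofs are below) =====
def Claim_equal_inserirEstado : Prop := ∀ (heap : List Int) (estado : Int), Dom_inserirEstado heap estado → Spec_inserirEstado heap estado (inserirEstado heap estado)

-- ===== LEMMAS AND PROOFS =====


-- total get/set at a nonnegative Int index, in Nat form
lemma pyGetD_toNat (h : List Int) (q d : Int) (hq : 0 ≤ q) :
    PySem.List.pyGetD h q d = h.getD q.toNat d := by
  obtain ⟨m, rfl⟩ := Int.eq_ofNat_of_zero_le hq
  rw [PySem.List.pyGetD_natCast]; simp

-- every index on the ancestor path of i is nonnegative and strictly below i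
lemma pathB_mem : ∀ (m : Nat) (i : Int), i.toNat ≤ m → ∀ q ∈ pathB i, 0 ≤ q ∧ q < i := by
  intro m
  induction m with
  | zero =>
    intro i hi q hq
    rw [pathB] at hq
    rw [dif_neg (by omega : ¬ (0:Int) < i)] at hq
    simp at hq
  | succ m ih =>
    intro i hi q hq
    rw [pathB] at hq
    by_cases hpos : (0:Int) < i
    · rw [dif_pos hpos] at hq
      have hfd : PySem.Int.floordiv (i - 1) 2 = (i - 1) / 2 :=
        PySem.Int.floordiv_eq_ediv_of_pos (by omega)
      rcases List.mem_cons.mp hq with h | h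
      · subst h; rw [hfd]; omega
      · have := ih _ (by rw [hfd]; omega) q h
        rw [hfd] at this; omega
    · rw [dif_neg hpos] at hq; simp at hq

lemma countB_congr (e : Int) : ∀ (l h1 h2 : List Int),
    (∀ q ∈ l, PySem.List.pyGetD h1 q 0 = PySem.List.pyGetD h2 q 0) →
    countB h1 e l = countB h2 e l := by
  intro l
  induction l with
  | nil => intro _ _ _; rfl
  | cons p ps ih =>
    intro h1 h2 hag
    simp only [countB, hag p (List.mem_cons_self ..)]
    rw [ih h1 h2 (fun q hq => hag q (List.mem_cons_of_mem _ hq))]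

-- the first action of shiftB writes index i, so a prior write at i is overwritten
lemma shiftB_overwrite (estado v : Int) : ∀ (l : List Int) (h : List Int) (i : Nat),
    (∀ q ∈ l, 0 ≤ q ∧ q < (i : Int)) →
    shiftB estado (h.set i v) (i : Int) l = shiftB estado h (i : Int) l := by
  intro l h i hl
  cases l with
  | nil => simp [shiftB, PySem.List.pySetD_natCast, List.set_set]
  | cons p ps =>
    have hp := hl p (List.mem_cons_self ..)
    simp only [shiftB]
    rw [pyGetD_toNat _ _ _ hp.1, pyGetD_toNat _ _ _ hp.1]
    have hget : (h.set i v).getD p.toNat 0 = h.getD p.toNat 0 := by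
      simp [List.getD_eq_getElem?_getD,
        List.getElem?_set_ne (by omega : i ≠ p.toNat)]
    rw [hget, PySem.List.pySetD_natCast, PySem.List.pySetD_natCast, List.set_set]

-- main invariant: A's loop from index n on hb.set n estado equals B's staged passes from n
lemma loopA_eq_staged (estado : Int) : ∀ (n : Nat) (hb : List Int), n < hb.length →
    inserirLoopA (hb.set n estado) (n : Int) =
      shiftB estado (hb.set n estado) (n : Int)
        ((pathB (n : Int)).take (countB (hb.set n estado) estado (pathB (n : Int)))) := by
  intro n
  induction n using Nat.strong_induction_on with
  | _ n ih =>
    intro hb hlen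
    rcases Nat.eq_zero_or_pos n with h0 | hpos
    · subst h0
      rw [inserirLoopA, pathB]
      simp [PySem.Int.floordiv, PySem.List.pyGetD, PySem.List.pyGet?, PySem.List.pyIdx?,
        shiftB, PySem.List.pySetD, PySem.List.pySet?, hlen, List.set_set]
    · have hn1 : (n : Int) - 1 = ((n - 1 : Nat) : Int) := by omega
      have hfd : PySem.Int.floordiv ((n : Int) - 1) 2 = (((n - 1) / 2 : Nat) : Int) := by
        rw [hn1]; exact_mod_cast PySem.Int.floordiv_natCast (n - 1) 2
      set p : Nat := (n - 1) / 2 with hp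
      have hpn : p < n := by omega
      have hgu : PySem.List.pyGetD (hb.set n estado) ((n : Int)) 0 = estado := by
        simp [PySem.List.pyGetD_natCast, List.getD_eq_getElem?_getD, hlen]
      have hgp : PySem.List.pyGetD (hb.set n estado) ((p : Int)) 0 = hb.getD p 0 := by
        simp [PySem.List.pyGetD_natCast, List.getD_eq_getElem?_getD,
          List.getElem?_set_ne (by omega : n ≠ p)]
      set hbp : Int := hb.getD p 0 with hbpdef
      have hpath : pathB ((n : Int)) = ((p : Nat) : Int) :: pathB ((p : Nat) : Int) := by
        rw [pathB, dif_pos (by omega : (0:Int) < (n:Int)), hfd]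
      rw [inserirLoopA]
      simp only [hfd, hgu, hpath, countB, hgp]
      by_cases hc : estado < hbp
      · rw [dif_pos ⟨by positivity, hc⟩, if_pos hc]
        -- count over the tail: the arrays agree on all ancestors of p
        have hmemp := pathB_mem p ((p:Nat):Int) (by simp)
        have hcnt : countB (hb.set n estado) estado (pathB ((p : Nat) : Int))
            = countB ((hb.set n hbp).set p estado) estado (pathB ((p : Nat) : Int)) := by
          apply countB_congr
          intro q hq
          have hqb := hmemp q hq
          rw [pyGetD_toNat _ _ _ hqb.1, pyGetD_toNat _ _ _ hqb.1]
          simp [List.getD_eq_getElem?_getD,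
            List.getElem?_set_ne (by omega : n ≠ q.toNat),
            List.getElem?_set_ne (by omega : p ≠ q.toNat)]
        -- A side: one swap = set form
        have harg : ((hb.set n estado).set p estado).set n hbp
            = (hb.set n hbp).set p estado := by
          rw [List.set_comm _ _ (by omega : p ≠ n), List.set_set,
            List.set_comm _ _ (by omega : n ≠ p)]
        simp only [PySem.List.pySetD_natCast]
        rw [harg]
        have hIH := ih p hpn (hb.set n hbp) (by simpa using lt_trans hpn hlen)
        rw [hIH, ← hcnt]
        -- B side: take (1 + k) = p :: take k, first shift step
        rw [Nat.add_comm 1, List.take_succ_cons]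
        simp only [shiftB, hgp, PySem.List.pySetD_natCast, List.set_set]
        -- drop the stale write at p on the IH side
        rw [shiftB_overwrite]
        intro q hq
        have := hmemp q (List.mem_of_mem_take hq)
        exact this
      · rw [dif_neg (fun h => hc h.2), if_neg hc]
        simp [shiftB, PySem.List.pySetD_natCast, List.set_set]

-- ===== VERDICT (by name: the statement is the Claim_ definition above) =====
theorem inserirEstado_spec : Claim_equal_inserirEstado := by
  intro heap estado _
  unfold Spec_inserirEstado inserirEstado inserirEstado_alt
  simp only
  have hself : (heap ++ [estado]).set heap.length estado = heap ++ [estado] := by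
    rw [List.set_append_right _ _ (le_refl _)]
    simp
  have hl : ((heap ++ [estado]).length : Int) - 1 = (heap.length : Int) := by simp
  rw [hl, ← hself, loopA_eq_staged estado heap.length (heap ++ [estado]) (by simp)]
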